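-- pv_equiv track=rewrite | github.com/pokemaster345x/Codeforces-Solutions | codeforces/Training Camp Medellín 2024/Contest Avanzado [Día 1]/E - Death Note.py | idk
-- ===== SOURCE A (Python) =====
-- def idk(n, m, a):
--     pag = 0
--     rest = []
--     for x in a:
--         nombres =  pag+ x
--         xd = nombres // m
--         pag = nombres % m
--         rest.append(xd)
--     return rest
-- ===== SOURCE B (Python) =====
-- def idk(n, m, a):
--     # divide and conquer: split the list in halves, solve each half recursively
--     # threading the leftover carry from the left half into the right half
--     def solve(seg, pag):
--         if not seg:
--             return [], pag
--         if len(seg) == 1: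
--             s = pag + seg[0]
--             return [s // m], s % m
--         mid = len(seg) // 2
--         left, r1 = solve(seg[:mid], pag)
--         right, r2 = solve(seg[mid:], r1)
--         return left + right, r2
--     return solve(a, 0)[0]
-- ===== Notes on version B (the rewrite author's own statement) =====
-- stated objective: alternative
-- what changed: B solves the problem by divide and conquer: it recursively splits the list into halves, solves each half, and threads the leftover carry from the left half into the right half, instead of A's single left-to-right loop carrying a remainder.
import Mathlib
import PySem

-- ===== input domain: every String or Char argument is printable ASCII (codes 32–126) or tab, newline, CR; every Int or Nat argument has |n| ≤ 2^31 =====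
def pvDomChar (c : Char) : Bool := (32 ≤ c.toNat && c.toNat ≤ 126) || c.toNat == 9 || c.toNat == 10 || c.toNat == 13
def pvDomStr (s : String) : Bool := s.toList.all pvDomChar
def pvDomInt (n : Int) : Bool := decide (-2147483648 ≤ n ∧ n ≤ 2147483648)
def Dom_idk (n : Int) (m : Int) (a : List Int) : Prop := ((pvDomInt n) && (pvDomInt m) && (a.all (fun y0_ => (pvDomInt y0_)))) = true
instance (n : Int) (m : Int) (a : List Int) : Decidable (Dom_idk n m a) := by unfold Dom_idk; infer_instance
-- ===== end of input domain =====

-- B replaces A's linear carry loop by a divide-and-conquer recursion on list halves (alternative decomposition, no speed claim).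

-- ===== PORT A =====
def idk (n : Int) (m : Int) (a : List Int) : List Int :=
  (a.foldl (fun st x =>
      let nombres := st.1 + x
      let xd := PySem.Int.floordiv nombres m
      (PySem.Int.mod nombres m, st.2 ++ [xd]))
    ((0 : Int), ([] : List Int))).2

-- ===== PORT B =====
-- helper 'solve' of Source B: (pages-per-element of seg starting with carry pag, final carry).
-- seg[:mid] / seg[mid:] are ported as take/drop, exact here since 0 ≤ mid ≤ len(seg).
def idkSolve (m : Int) : List Int → Int → List Int × Int
  | [], pag => ([], pag)
  | [x], pag => ([PySem.Int.floordiv (pag + x) m], PySem.Int.mod (pag + x) m)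
  | x :: y :: rest, pag =>
    let seg := x :: y :: rest
    let mid := seg.length / 2
    let L := idkSolve m (seg.take mid) pag
    let R := idkSolve m (seg.drop mid) L.2
    (L.1 ++ R.1, R.2)
termination_by seg _ => seg.length
decreasing_by
  · simp [List.length_take]; omega
  · simp; omega

def idk_alt (n : Int) (m : Int) (a : List Int) : List Int :=
  (idkSolve m a 0).1

-- ===== PRECONDITION & SPEC =====
-- Pre_ excludes m = 0 with a nonempty list, exactly where the Python A (and B) raises ZeroDivisionError
-- (with an empty list no division runs).
def Pre_idk (n : Int) (m : Int) (a : List Int) : Prop := m ≠ 0 ∨ a = []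
instance (n : Int) (m : Int) (a : List Int) : Decidable (Pre_idk n m a) := by unfold Pre_idk; infer_instance
def pvWitness_idk : Int × Int × List Int := (3, 2, [1, 2, 3])

def Spec_idk (n : Int) (m : Int) (a : List Int) (out : List Int) : Prop := out = idk_alt n m a
instance (n : Int) (m : Int) (a : List Int) (out : List Int) : Decidable (Spec_idk n m a out) := by unfold Spec_idk; infer_instance

-- ===== CLAIM (what is proved, stated in full; the proofs are below) =====
def Claim_equal_idk : Prop := ∀ (n : Int) (m : Int) (a : List Int), Dom_idk n m a → Pre_idk n m a → Spec_idk n m a (idk n m a)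

-- ===== LEMMAS AND PROOFS =====

-- A's loop step, abbreviated for the lemmas below (definitionally the lambda inside idk).
def idkStep (m : Int) (st : Int × List Int) (x : Int) : Int × List Int :=
  let nombres := st.1 + x
  (PySem.Int.mod nombres m, st.2 ++ [PySem.Int.floordiv nombres m])

-- The accumulated output list factors out of A's fold.
theorem idkStep_shift (m : Int) (seg : List Int) : ∀ (st : Int × List Int),
    seg.foldl (idkStep m) st =
      ((seg.foldl (idkStep m) (st.1, [])).1, st.2 ++ (seg.foldl (idkStep m) (st.1, [])).2) := by
  induction seg with
  | nil => intro st; simp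
  | cons x s ih =>
    intro st
    simp only [List.foldl_cons]
    rw [ih (idkStep m st x), ih (idkStep m (st.1, []) x)]
    simp [idkStep]

-- The divide-and-conquer solver computes exactly A's fold (output list, final carry):
-- strong induction on the length of the segment.
theorem idkSolve_spec_aux (m : Int) : ∀ (N : Nat) (seg : List Int) (p : Int), seg.length ≤ N →
    idkSolve m seg p = ((seg.foldl (idkStep m) (p, [])).2, (seg.foldl (idkStep m) (p, [])).1) := by
  intro N
  induction N with
  | zero =>
    intro seg p h
    cases seg with
    | nil => simp [idkSolve]
    | cons x t => simp at h
  | succ N ih =>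
    intro seg p h
    cases seg with
    | nil => simp [idkSolve]
    | cons x t =>
      cases t with
      | nil => simp [idkSolve, idkStep]
      | cons y rest =>
        simp only [idkSolve]
        have h1 : ((x :: y :: rest).take ((x :: y :: rest).length / 2)).length ≤ N := by
          simp [List.length_take]; simp at h; omega
        have h2 : ((x :: y :: rest).drop ((x :: y :: rest).length / 2)).length ≤ N := by
          simp; simp at h; omega
        rw [ih _ _ h1, ih _ _ h2]
        have hfold : ((x :: y :: rest).take ((x :: y :: rest).length / 2) ++
              (x :: y :: rest).drop ((x :: y :: rest).length / 2)).foldl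
              (idkStep m) (p, ([] : List Int))
            = (x :: y :: rest).foldl (idkStep m) (p, []) := by
          rw [List.take_append_drop]
        rw [← hfold]
        rw [List.foldl_append]
        rw [idkStep_shift m ((x :: y :: rest).drop ((x :: y :: rest).length / 2))
              (List.foldl (idkStep m) (p, []) ((x :: y :: rest).take ((x :: y :: rest).length / 2)))]

theorem idkSolve_spec (m : Int) (seg : List Int) (p : Int) :
    idkSolve m seg p = ((seg.foldl (idkStep m) (p, [])).2, (seg.foldl (idkStep m) (p, [])).1) :=
  idkSolve_spec_aux m seg.length seg p le_rfl

-- ===== VERDICT (by name: the statement is the Claim_ definition above) =====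
theorem idk_spec : Claim_equal_idk := by
  intro n m a _ _
  unfold Spec_idk idk idk_alt
  rw [idkSolve_spec m a 0]
  rfl
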